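-- pv_equiv track=rewrite | github.com/mmakaay/adventofcode2024 | 24_Crossed_Wires/part1.py | get_z_register_number
-- ===== SOURCE A (Python) =====
-- def get_z_register_number(registers):
--     def z_registers():
--         z = 0
--         while True:
--             name = f"z{z:02}"
--             if name not in registers:
--                 return
--             yield (f"z{z:02}")
--             z += 1
--
--     number = 0
--     bit = 1
--     for z_register in z_registers():
--         number |= bit * registers[z_register]
--         bit <<= 1
--
--     return number
-- ===== SOURCE B (Python) =====
-- def get_z_register_number(registers):
--     # Pass 1: count how many consecutive z-registers are present (first gap stops the scan).
--     count = 0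
--     while f"z{count:02}" in registers:
--         count += 1
--     # Pass 2: Horner-style assembly from the most significant register down:
--     # shift the accumulated number left by one and OR in the next lower register.
--     number = 0
--     for z in range(count - 1, -1, -1):
--         number = (number << 1) | registers[f"z{z:02}"]
--     return number
-- ===== Notes on version B (the rewrite author's own statement) =====
-- stated objective: alternative
-- what changed: Replaces A's single forward loop that fuses name generation with an accumulator holding a running bit multiplier (number |= bit*value; bit <<= 1) by two passes: first count the consecutive z-registers up to the first gap, then assemble the number Horner-style from the most significant register downward (number = (number << 1) | value), so no bit/position state is kept and the accumulated number itself is shifted each step.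
import Mathlib
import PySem

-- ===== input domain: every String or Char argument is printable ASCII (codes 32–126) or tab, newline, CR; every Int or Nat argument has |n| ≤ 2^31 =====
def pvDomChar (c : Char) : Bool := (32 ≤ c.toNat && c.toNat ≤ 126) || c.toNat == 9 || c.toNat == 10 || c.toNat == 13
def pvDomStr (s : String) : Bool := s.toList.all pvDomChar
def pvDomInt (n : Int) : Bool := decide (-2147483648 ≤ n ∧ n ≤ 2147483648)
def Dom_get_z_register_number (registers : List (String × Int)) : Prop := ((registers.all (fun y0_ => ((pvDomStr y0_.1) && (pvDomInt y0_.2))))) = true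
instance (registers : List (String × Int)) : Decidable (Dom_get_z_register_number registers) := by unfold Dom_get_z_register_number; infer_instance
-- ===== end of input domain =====

-- B replaces A's fused forward loop (running bit multiplier, OR of value*bit) by two passes: count the consecutive z-registers, then assemble the number Horner-style from the top register down (number = (number << 1) | v); alternative decomposition, same cost.


-- shared helpers: dict lookup (first match, Python dict key semantics) and the name f"z{z:02}"
def pvLookup (registers : List (String × Int)) (name : String) : Option Int :=
  (registers.find? (fun p => p.1 == name)).map (·.2)

def pvZName (z : Int) : String :=
  if z < 10 then "z0" ++ PySem.Int.toStr z else "z" ++ PySem.Int.toStr z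

-- ===== PORT A =====
-- A's while-generator fused with the accumulator loop: state (z, number, bit), bit <<= 1 each
-- step, number |= bit * registers[name].  The loop stops at the first missing name; at most
-- registers.length consecutive z-names exist, so fuel registers.length + 1 is only a
-- termination device.
def pvGoA (registers : List (String × Int)) : Nat → Int → Int → Int → Int
  | 0, _, num, _ => num
  | fuel + 1, z, num, bit =>
    match pvLookup registers (pvZName z) with
    | none => num
    | some v => pvGoA registers fuel (z + 1) (PySem.Int.bor num (bit * v)) (bit <<< (1 : Nat))

def get_z_register_number (registers : List (String × Int)) : Int :=
  pvGoA registers (registers.length + 1) 0 0 1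

-- ===== PORT B =====
-- pass 1: count the consecutive z-registers (same fuel device for the while loop)
def pvCount (registers : List (String × Int)) : Nat → Int → Int
  | 0, count => count
  | fuel + 1, count =>
    if (pvLookup registers (pvZName count)).isSome then pvCount registers fuel (count + 1)
    else count

def get_z_register_number_alt (registers : List (String × Int)) : Int :=
  let count := pvCount registers (registers.length + 1) 0
  -- pass 2: for z in range(count-1, -1, -1): number = (number << 1) | registers[name].
  -- registers[name] cannot raise here (z < count, so the name was seen by pass 1): .getD 0
  -- only totalises the lookup.
  (PySem.List.pyRange (count - 1) (-1) (-1)).foldl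
    (fun number z => PySem.Int.bor (number <<< (1 : Nat)) ((pvLookup registers (pvZName z)).getD 0)) 0

-- ===== PRECONDITION & SPEC =====
def Spec_get_z_register_number (registers : List (String × Int)) (out : Int) : Prop := out = get_z_register_number_alt registers
instance (registers : List (String × Int)) (out : Int) : Decidable (Spec_get_z_register_number registers out) := by unfold Spec_get_z_register_number; infer_instance

-- ===== CLAIM (what is proved, stated in full; the proofs are below) =====
def Claim_equal_get_z_register_number : Prop := ∀ (registers : List (String × Int)), Dom_get_z_register_number registers → Spec_get_z_register_number registers (get_z_register_number registers)

-- ===== LEMMAS AND PROOFS =====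

-- Nat-level bit facts
lemma pvLdiffZero (m : Nat) : (0 : Nat).ldiff m = 0 := by
  apply Nat.eq_of_testBit_eq; intro i; simp [Nat.testBit_ldiff]

-- Python's  p - (p & m)  is the bitwise difference p &~ m (the subtraction is exact bit by bit)
lemma pvSubAndEqLdiff (p m : Nat) : p - (p &&& m) = p.ldiff m := by
  induction p using Nat.binaryRec generalizing m with
  | zero => simp [Nat.zero_and, pvLdiffZero]
  | bit b p' ih =>
    conv_lhs => rw [← Nat.bit_testBit_zero_shiftRight_one m]
    conv_rhs => rw [← Nat.bit_testBit_zero_shiftRight_one m]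
    rw [Nat.land_bit, Nat.ldiff_bit, Nat.bit_val, Nat.bit_val, Nat.bit_val]
    have hle := @Nat.and_le_left p' (m >>> 1)
    have h2 := ih (m >>> 1)
    cases b <;> cases m.testBit 0 <;> simp <;> omega

lemma pvOrDouble (m n : Nat) : 2 * m ||| 2 * n = 2 * (m ||| n) := by
  have := Nat.lor_bit false m false n
  simpa [Nat.bit_val] using this

lemma pvAndDouble₂ (p q : Nat) : (2 * p + 1) &&& (2 * q + 1) = 2 * (p &&& q) + 1 := by
  have := Nat.land_bit true p true q
  simpa [Nat.bit_val] using this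

lemma pvLdiffDouble (n m : Nat) : (2 * n + 1).ldiff (2 * m) = 2 * n.ldiff m + 1 := by
  have := Nat.ldiff_bit true n false m
  simpa [Nat.bit_val] using this

-- the four sign shapes of PySem.Int.bor, with the subtraction written as Nat.ldiff
lemma pvBorPP {x y : Int} (hx : 0 ≤ x) (hy : 0 ≤ y) :
    PySem.Int.bor x y = ((x.toNat ||| y.toNat : Nat) : Int) := by
  simp [PySem.Int.bor, hx, hy]

lemma pvBorPN {x y : Int} (hx : 0 ≤ x) (hy : y < 0) :
    PySem.Int.bor x y = -(((-y - 1).toNat.ldiff x.toNat : Nat) : Int) - 1 := by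
  simp [PySem.Int.bor, hx, not_le.mpr hy, pvSubAndEqLdiff]

lemma pvBorNP {x y : Int} (hx : x < 0) (hy : 0 ≤ y) :
    PySem.Int.bor x y = -(((-x - 1).toNat.ldiff y.toNat : Nat) : Int) - 1 := by
  simp [PySem.Int.bor, not_le.mpr hx, hy, pvSubAndEqLdiff]

lemma pvBorNN {x y : Int} (hx : x < 0) (hy : y < 0) :
    PySem.Int.bor x y = -((((-x - 1).toNat &&& (-y - 1).toNat : Nat)) : Int) - 1 := by
  simp [PySem.Int.bor, not_le.mpr hx, not_le.mpr hy]

lemma pvUn (t : Nat) : (-(-(t : Int) - 1) - 1).toNat = t := by omega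

lemma pvBorAssoc (a b c : Int) :
    PySem.Int.bor (PySem.Int.bor a b) c = PySem.Int.bor a (PySem.Int.bor b c) := by
  have ext : ∀ {u v : Nat}, (∀ i, u.testBit i = v.testBit i) → ((u : Int) = v) := by
    intro u v h
    rw [Nat.eq_of_testBit_eq h]
  rcases le_or_gt (0:Int) a with ha | ha <;> rcases le_or_gt (0:Int) b with hb | hb <;>
    rcases le_or_gt (0:Int) c with hc | hc
  · rw [pvBorPP ha hb, pvBorPP hb hc, pvBorPP (Int.natCast_nonneg _) hc,
      pvBorPP ha (Int.natCast_nonneg _)]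
    simp [Nat.lor_assoc]
  · rw [pvBorPP ha hb, pvBorPN hb hc, pvBorPN (Int.natCast_nonneg _) hc, pvBorPN ha (by omega)]
    simp only [Int.toNat_natCast, pvUn, sub_left_inj, neg_inj]
    apply ext; intro i
    simp [Nat.testBit_ldiff, Nat.testBit_lor, Bool.not_or, Bool.and_assoc, Bool.and_comm,
      Bool.and_left_comm]
  · rw [pvBorPN ha hb, pvBorNP hb hc, pvBorNP (by omega) hc, pvBorPN ha (by omega)]
    simp only [Int.toNat_natCast, pvUn, sub_left_inj, neg_inj]
    apply ext; intro i
    simp [Nat.testBit_ldiff, Bool.and_assoc, Bool.and_comm, Bool.and_left_comm]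
  · rw [pvBorPN ha hb, pvBorNN hb hc, pvBorNN (by omega) hc, pvBorPN ha (by omega)]
    simp only [Int.toNat_natCast, pvUn, sub_left_inj, neg_inj]
    apply ext; intro i
    simp [Nat.testBit_ldiff, Nat.testBit_land, Bool.and_assoc, Bool.and_comm, Bool.and_left_comm]
  · rw [pvBorNP ha hb, pvBorPP hb hc, pvBorNP (by omega) hc, pvBorNP ha (Int.natCast_nonneg _)]
    simp only [Int.toNat_natCast, pvUn, sub_left_inj, neg_inj]
    apply ext; intro i
    simp [Nat.testBit_ldiff, Nat.testBit_lor, Bool.not_or, Bool.and_assoc, Bool.and_comm,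
      Bool.and_left_comm]
  · rw [pvBorNP ha hb, pvBorPN hb hc, pvBorNN (by omega) hc, pvBorNN ha (by omega)]
    simp only [Int.toNat_natCast, pvUn, sub_left_inj, neg_inj]
    apply ext; intro i
    simp [Nat.testBit_ldiff, Nat.testBit_land, Bool.and_assoc, Bool.and_comm, Bool.and_left_comm]
  · rw [pvBorNN ha hb, pvBorNP hb hc, pvBorNP (by omega) hc, pvBorNN ha (by omega)]
    simp only [Int.toNat_natCast, pvUn, sub_left_inj, neg_inj]
    apply ext; intro i
    simp [Nat.testBit_ldiff, Nat.testBit_land, Bool.and_assoc, Bool.and_comm, Bool.and_left_comm]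
  · rw [pvBorNN ha hb, pvBorNN hb hc, pvBorNN (by omega) hc, pvBorNN ha (by omega)]
    simp only [Int.toNat_natCast, pvUn, sub_left_inj, neg_inj]
    simp [Nat.land_assoc]

lemma pvBorDouble (a b : Int) :
    PySem.Int.bor (2 * a) (2 * b) = 2 * PySem.Int.bor a b := by
  rcases le_or_gt (0:Int) a with ha | ha <;> rcases le_or_gt (0:Int) b with hb | hb
  · rw [pvBorPP ha hb, pvBorPP (by linarith) (by linarith)]
    have h1 : (2 * a).toNat = 2 * a.toNat := by omega
    have h2 : (2 * b).toNat = 2 * b.toNat := by omega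
    rw [h1, h2, pvOrDouble]; push_cast; ring
  · rw [pvBorPN ha hb, pvBorPN (by linarith) (by linarith)]
    have h1 : (2 * a).toNat = 2 * a.toNat := by omega
    have h2 : (-(2 * b) - 1).toNat = 2 * (-b - 1).toNat + 1 := by omega
    rw [h1, h2, pvLdiffDouble]; push_cast; ring
  · rw [pvBorNP ha hb, pvBorNP (by linarith) (by linarith)]
    have h1 : (2 * b).toNat = 2 * b.toNat := by omega
    have h2 : (-(2 * a) - 1).toNat = 2 * (-a - 1).toNat + 1 := by omega
    rw [h1, h2, pvLdiffDouble]; push_cast; ring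
  · rw [pvBorNN ha hb, pvBorNN (by linarith) (by linarith)]
    have h1 : (-(2 * a) - 1).toNat = 2 * (-a - 1).toNat + 1 := by omega
    have h2 : (-(2 * b) - 1).toNat = 2 * (-b - 1).toNat + 1 := by omega
    rw [h1, h2, pvAndDouble₂]; push_cast; ring

lemma pvBorShift (a b : Int) (k : Nat) :
    PySem.Int.bor a b * 2 ^ k = PySem.Int.bor (a * 2 ^ k) (b * 2 ^ k) := by
  induction k with
  | zero => simp
  | succ k ih =>
    have h2 : ∀ x : Int, x * 2 ^ (k + 1) = 2 * (x * 2 ^ k) := by intro x; ring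
    rw [h2, h2, h2, pvBorDouble, ih]

-- proof-side recursive form: back-to-front combination with the same fuel discipline
def pvComb (registers : List (String × Int)) : Nat → Int → Int
  | 0, _ => 0
  | fuel + 1, z =>
    match pvLookup registers (pvZName z) with
    | none => 0
    | some v => PySem.Int.bor v (pvComb registers fuel (z + 1) <<< (1 : Nat))

-- length of the consecutive run, the Nat the count loop computes
def pvLen (registers : List (String × Int)) : Nat → Int → Nat
  | 0, _ => 0
  | fuel + 1, z =>
    if (pvLookup registers (pvZName z)).isSome then pvLen registers fuel (z + 1) + 1 else 0

lemma pvCount_eq_len (registers : List (String × Int)) :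
    ∀ (fuel : Nat) (c : Int), pvCount registers fuel c = c + (pvLen registers fuel c : Int) := by
  intro fuel
  induction fuel with
  | zero => intro c; simp [pvCount, pvLen]
  | succ f ih =>
    intro c
    unfold pvCount pvLen
    by_cases h : (pvLookup registers (pvZName c)).isSome <;> simp [h, ih] <;> push_cast <;> ring

-- A's loop equals the back-to-front combination, shifted under the accumulated OR
lemma pvGoA_eq_comb (registers : List (String × Int)) :
    ∀ (fuel : Nat) (z num : Int) (k : Nat),
      pvGoA registers fuel z num ((2 : Int) ^ k) =
        PySem.Int.bor num (pvComb registers fuel z <<< k) := by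
  intro fuel
  induction fuel with
  | zero => intro z num k; simp [pvGoA, pvComb]
  | succ f ih =>
    intro z num k
    unfold pvGoA pvComb
    cases h : pvLookup registers (pvZName z) with
    | none => simp
    | some v =>
      dsimp only
      have h2 : (2 : Int) ^ k <<< (1 : Nat) = 2 ^ (k + 1) := by
        rw [Int.shiftLeft_eq]; ring
      rw [h2, ih (z + 1) _ (k + 1)]
      simp only [Int.shiftLeft_eq]
      rw [pvBorShift, ← pvBorAssoc]
      congr 1
      · congr 1; ring
      · ring

-- B's countdown fold, read back to front (foldr over the ascending range), equals pvComb
lemma pvFoldr_eq_comb (registers : List (String × Int)) :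
    ∀ (fuel : Nat) (z : Int),
      (PySem.List.pyRange z (z + (pvLen registers fuel z : Int)) 1).foldr
        (fun i acc => PySem.Int.bor (acc <<< (1 : Nat)) ((pvLookup registers (pvZName i)).getD 0)) 0 =
      pvComb registers fuel z := by
  intro fuel
  induction fuel with
  | zero =>
    intro z
    simp [pvLen, pvComb, PySem.List.pyRange_one_eq_nil (by omega : z ≤ z + ((0 : Nat) : Int))]
  | succ f ih =>
    intro z
    unfold pvLen pvComb
    cases h : pvLookup registers (pvZName z) with
    | none =>
      simp [h, PySem.List.pyRange_one_eq_nil (by omega : z ≤ z + ((0 : Nat) : Int))]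
    | some v =>
      simp only [Option.isSome_some, if_true]
      have hcons := PySem.List.pyRange_one_cons
        (show z < z + ((pvLen registers f (z + 1) + 1 : Nat) : Int) by push_cast; omega)
      rw [hcons, List.foldr_cons]
      have hend : z + ((pvLen registers f (z + 1) + 1 : Nat) : Int) =
          (z + 1) + ((pvLen registers f (z + 1) : Nat) : Int) := by push_cast; ring
      rw [hend, ih (z + 1), h]
      simp [PySem.Int.bor_comm]

-- B's countdown fold equals the back-to-front combination
lemma pvFold_eq_comb (registers : List (String × Int)) (fuel : Nat) (z : Int) :
      (PySem.List.pyRange (z + (pvLen registers fuel z : Int) - 1) (z - 1) (-1)).foldl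
        (fun number i => PySem.Int.bor (number <<< (1 : Nat)) ((pvLookup registers (pvZName i)).getD 0)) 0 =
      pvComb registers fuel z := by
  rw [PySem.List.pyRange_neg_one_eq_reverse]
  have he1 : z - 1 + 1 = z := by ring
  have he2 : z + (pvLen registers fuel z : Int) - 1 + 1 = z + (pvLen registers fuel z : Int) := by
    ring
  rw [he1, he2, List.foldl_reverse]
  exact pvFoldr_eq_comb registers fuel z

-- ===== VERDICT (by name: the statement is the Claim_ definition above) =====
theorem get_z_register_number_spec : Claim_equal_get_z_register_number := by
  intro registers _
  unfold Spec_get_z_register_number get_z_register_number get_z_register_number_alt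
  have hA := pvGoA_eq_comb registers (registers.length + 1) 0 0 0
  have hB := pvFold_eq_comb registers (registers.length + 1) 0
  simp only [pow_zero, Int.shiftLeft_zero] at hA
  simp only [zero_add, zero_sub] at hB
  rw [hA, PySem.Int.bor_comm, PySem.Int.bor_zero, pvCount_eq_len]
  simp only [zero_add]
  exact hB.symm
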